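-- pv_equiv track=rewrite | github.com/nataliest/copycatch | src/db_utils.py | sort_by_level
-- ===== SOURCE A (Python) =====
-- from collections import OrderedDict
--
-- def sort_by_level(tags, r_tag_levels):
--     od = OrderedDict()
--     for tag in tags:
--         level = str(r_tag_levels.get(tag))
--         if level in od:
--             od[level].append(tag)
--         else:
--             od[level] = [tag]
--
--     od = OrderedDict(sorted(od.items(), key=lambda t: t[0]))
--     res_list = []
--     for key in od:
--         res_list = od[key] + res_list
--
--     return res_list
-- ===== SOURCE B (Python) =====
-- def sort_by_level(tags, r_tag_levels):
--     # One stable sort, descending by the stringified level: stability keeps the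
--     # original order inside each level group, reproducing A's group-and-concat.
--     return sorted(tags, key=lambda tag: str(r_tag_levels.get(tag)), reverse=True)
-- ===== Notes on version B (the rewrite author's own statement) =====
-- stated objective: simpler
-- what changed: Replaces the group-into-OrderedDict / sort-groups / prepend-concatenate pipeline with a single stable sort of the tags keyed on the stringified level, descending; stability supplies the within-level order A got from grouping.
import Mathlib
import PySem

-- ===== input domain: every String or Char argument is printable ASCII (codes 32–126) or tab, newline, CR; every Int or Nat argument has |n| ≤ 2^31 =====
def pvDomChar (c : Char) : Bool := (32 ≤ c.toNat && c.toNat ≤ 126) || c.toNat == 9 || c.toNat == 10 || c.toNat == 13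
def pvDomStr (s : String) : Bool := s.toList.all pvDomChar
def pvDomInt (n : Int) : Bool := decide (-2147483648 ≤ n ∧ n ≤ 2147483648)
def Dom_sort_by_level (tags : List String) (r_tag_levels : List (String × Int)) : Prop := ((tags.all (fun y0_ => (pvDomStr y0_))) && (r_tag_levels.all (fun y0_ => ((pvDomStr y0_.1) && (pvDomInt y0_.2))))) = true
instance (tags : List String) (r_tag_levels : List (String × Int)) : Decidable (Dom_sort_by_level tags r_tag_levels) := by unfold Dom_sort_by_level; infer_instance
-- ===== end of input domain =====

-- B replaces A's group-into-dict / sort-groups / prepend pipeline with one stable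
-- descending sort keyed on the stringified level (objective: simpler).

-- ===== PORT A =====
-- shared by both ports: str(r_tag_levels.get(tag)) — dict lookup (first match), str(None) = "None"
def levelKey (r_tag_levels : List (String × Int)) (tag : String) : String :=
  match r_tag_levels.lookup tag with
  | none => "None"
  | some n => PySem.Int.toStr n

def sort_by_level (tags : List String) (r_tag_levels : List (String × Int)) : List String :=
  let od : PySem.Dict String (List String) :=
    tags.foldl (fun od tag =>
      let level := levelKey r_tag_levels tag
      if od.contains level then od.insert level (od.getD level [] ++ [tag])
      else od.insert level [tag]) PySem.Dict.empty
  let od2 : PySem.Dict String (List String) :=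
    PySem.Dict.ofList (PySem.List.sorted od.items (fun t => t.1) false)
  od2.keys.foldl (fun res_list k => od2.getD k [] ++ res_list) []

-- ===== PORT B =====
def sort_by_level_alt (tags : List String) (r_tag_levels : List (String × Int)) : List String :=
  PySem.List.sorted tags (levelKey r_tag_levels) true

-- ===== PRECONDITION & SPEC =====
def Spec_sort_by_level (tags : List String) (r_tag_levels : List (String × Int)) (out : List String) : Prop := out = sort_by_level_alt tags r_tag_levels
instance (tags : List String) (r_tag_levels : List (String × Int)) (out : List String) : Decidable (Spec_sort_by_level tags r_tag_levels out) := by unfold Spec_sort_by_level; infer_instance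

-- ===== CLAIM (what is proved, stated in full; the proofs are below) =====
def Claim_equal_sort_by_level : Prop := ∀ (tags : List String) (r_tag_levels : List (String × Int)), Dom_sort_by_level tags r_tag_levels → Spec_sort_by_level tags r_tag_levels (sort_by_level tags r_tag_levels)

-- ===== LEMMAS AND PROOFS =====

-- insertBy passes over a prefix none of whose elements trigger `before`
theorem insertBy_append_of_not_before {α : Type} (before : α → α → Bool) (x : α)
    (l m : List α) (h : ∀ y ∈ l, before x y = false) :
    PySem.List.insertBy before x (l ++ m) = l ++ PySem.List.insertBy before x m := by
  induction l with
  | nil => rfl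
  | cons y t ih =>
    simp only [List.cons_append, PySem.List.insertBy, h y (by simp)]
    exact congrArg (y :: ·) (ih (fun z hz => h z (by simp [hz])))

-- insertBy puts x in front when every element triggers `before`
theorem insertBy_front_of_all_before {α : Type} (before : α → α → Bool) (x : α)
    (m : List α) (h : ∀ y ∈ m, before x y = true) :
    PySem.List.insertBy before x m = x :: m := by
  cases m with
  | nil => rfl
  | cons y t => simp [PySem.List.insertBy, h y (by simp)]

theorem flatMap_congr_mem {α β : Type} (l : List α) (f g : α → List β)
    (h : ∀ a ∈ l, f a = g a) : l.flatMap f = l.flatMap g := by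
  simp only [List.flatMap]
  exact congrArg List.flatten (List.map_congr_left h)

-- inserting x into a descending-by-key grouped flatten, key x already a group key
theorem insert_grouped_mem (key : String → String) (x : String)
    (DK : List String) (g : String → List String)
    (hdesc : DK.Pairwise (fun a b => b < a))
    (hg : ∀ k ∈ DK, ∀ t ∈ g k, key t = k)
    (hc : key x ∈ DK) :
    PySem.List.insertBy (fun a b => decide (key b < key a)) x (DK.flatMap g)
      = DK.flatMap (fun k => g k ++ if key x == k then [x] else []) := by
  induction DK with
  | nil => cases hc
  | cons k rest ih =>
    rw [List.pairwise_cons] at hdesc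
    obtain ⟨hk, hrest⟩ := hdesc
    rw [List.flatMap_cons, List.flatMap_cons]
    by_cases hkc : key x = k
    · have h1 : ∀ y ∈ g k, (fun a b => decide (key b < key a)) x y = false := by
        intro y hy
        have hky := hg k List.mem_cons_self y hy
        simp only [hky, hkc]
        exact decide_eq_false (lt_irrefl _)
      rw [insertBy_append_of_not_before _ _ _ _ h1]
      have h2 : ∀ y ∈ rest.flatMap g, (fun a b => decide (key b < key a)) x y = true := by
        intro y hy
        obtain ⟨k', hk', hy'⟩ := List.mem_flatMap.mp hy
        simp only [hg k' (List.mem_cons_of_mem _ hk') y hy', hkc]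
        exact decide_eq_true (hk k' hk')
      rw [insertBy_front_of_all_before _ _ _ h2]
      have h3 : rest.flatMap (fun k' => g k' ++ if key x == k' then [x] else [])
          = rest.flatMap g := by
        apply flatMap_congr_mem
        intro k' hk'
        have hne : (key x == k') = false := by
          have hlt : k' < key x := hkc ▸ hk k' hk'
          exact beq_eq_false_iff_ne.mpr (fun h => absurd hlt (h ▸ lt_irrefl _))
        simp [hne]
      rw [h3]
      have hbe : (key x == k) = true := beq_iff_eq.mpr hkc
      simp [hbe]
    · have hc' : key x ∈ rest := by
        rcases List.mem_cons.mp hc with h | h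
        · exact absurd h hkc
        · exact h
      have hlt : key x < k := hk _ hc'
      have h1 : ∀ y ∈ g k, (fun a b => decide (key b < key a)) x y = false := by
        intro y hy
        simp only [hg k List.mem_cons_self y hy]
        exact decide_eq_false (lt_asymm hlt)
      rw [insertBy_append_of_not_before _ _ _ _ h1,
        ih hrest (fun k' h' => hg k' (List.mem_cons_of_mem _ h')) hc']
      have hbe : (key x == k) = false := beq_eq_false_iff_ne.mpr hkc
      simp [hbe]

-- inserting x whose key is new: a fresh singleton group appears at the key's position
theorem insert_grouped_new (key : String → String) (x : String)
    (DK : List String) (g : String → List String)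
    (hdesc : DK.Pairwise (fun a b => b < a))
    (hg : ∀ k ∈ DK, ∀ t ∈ g k, key t = k)
    (hc : key x ∉ DK) (hgc : g (key x) = []) :
    PySem.List.insertBy (fun a b => decide (key b < key a)) x (DK.flatMap g)
      = (PySem.List.insertBy (fun a b => decide (b < a)) (key x) DK).flatMap
          (fun k => g k ++ if key x == k then [x] else []) := by
  induction DK with
  | nil => simp [PySem.List.insertBy, hgc]
  | cons k rest ih =>
    rw [List.pairwise_cons] at hdesc
    obtain ⟨hk, hrest⟩ := hdesc
    have hkne : k ≠ key x := fun h => hc (by simp [h])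
    by_cases hlt : k < key x
    · have hins : PySem.List.insertBy (fun a b => decide (b < a)) (key x) (k :: rest)
          = key x :: k :: rest := by
        simp [PySem.List.insertBy, hlt]
      rw [hins]
      have hall : ∀ y ∈ (k :: rest).flatMap g, (fun a b => decide (key b < key a)) x y = true := by
        intro y hy
        obtain ⟨k', hk', hy'⟩ := List.mem_flatMap.mp hy
        have hke := hg k' hk' y hy'
        have hklt : k' < key x := by
          rcases List.mem_cons.mp hk' with h | h
          · exact h ▸ hlt
          · exact lt_trans (hk k' h) hlt
        simp only [hke]
        exact decide_eq_true hklt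
      rw [insertBy_front_of_all_before _ _ _ hall]
      have h3r : List.flatMap (fun k' => g k' ++ if key x = k' then [x] else []) rest
          = List.flatMap g rest := by
        apply flatMap_congr_mem
        intro k' hk'
        have hne : key x ≠ k' := fun h => hc (h ▸ List.mem_cons_of_mem _ hk')
        simp [hne]
      have hbk : key x ≠ k := fun h => hkne h.symm
      simp [List.flatMap_cons, hgc, hbk, h3r]
    · have hcr : key x ∉ rest := fun h => hc (List.mem_cons_of_mem _ h)
      have hins : PySem.List.insertBy (fun a b => decide (b < a)) (key x) (k :: rest)
          = k :: PySem.List.insertBy (fun a b => decide (b < a)) (key x) rest := by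
        simp [PySem.List.insertBy, hlt]
      rw [hins]
      have h1 : ∀ y ∈ g k, (fun a b => decide (key b < key a)) x y = false := by
        intro y hy
        simp only [hg k List.mem_cons_self y hy]
        exact decide_eq_false hlt
      rw [List.flatMap_cons, insertBy_append_of_not_before _ _ _ _ h1,
        ih hrest (fun k' h' => hg k' (List.mem_cons_of_mem _ h')) hcr]
      rw [List.flatMap_cons]
      have hbe : (key x == k) = false := beq_eq_false_iff_ne.mpr (Ne.symm hkne)
      simp only [hbe, Bool.false_eq_true, if_false, List.append_nil]

-- ascending sorted list of distinct keys is strictly increasing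
theorem sorted_pairwise_lt_of_nodup (K : List String) (h : K.Nodup) :
    (PySem.List.sorted K (fun x => x) false).Pairwise (fun a b => a < b) := by
  have h1 := PySem.List.sorted_pairwise K (fun x => x)
  have h2 : (PySem.List.sorted K (fun x => x) false).Nodup :=
    ((PySem.List.sorted_perm K (fun x => x) false).nodup_iff).mpr h
  exact (h1.and h2).imp (fun hab => lt_of_le_of_ne hab.1 hab.2)

theorem sorted_rev_pairwise_gt_of_nodup (K : List String) (h : K.Nodup) :
    (PySem.List.sorted K (fun x => x) true).Pairwise (fun a b => b < a) := by
  have h1 := PySem.List.sorted_pairwise_rev K (fun x => x)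
  have h2 : (PySem.List.sorted K (fun x => x) true).Nodup :=
    ((PySem.List.sorted_perm K (fun x => x) true).nodup_iff).mpr h
  exact (h1.and h2).imp (fun hab => lt_of_le_of_ne hab.1 (Ne.symm hab.2))

-- THE STABILITY LEMMA: a stable reverse sort is the concatenation, in strictly
-- descending key order, of the original-order groups of equal-key elements.
theorem sorted_rev_grouped (key : String → String) (xs : List String) :
    PySem.List.sorted xs key true
      = (PySem.List.sorted (PySem.Set.ofList (xs.map key)) (fun x => x) true).flatMap
          (fun k => xs.filter (fun t => key t == k)) := by
  induction xs using List.reverseRecOn with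
  | nil => simp [PySem.List.sorted, PySem.Set.ofList]
  | append_singleton xs x ih =>
    have hL : PySem.List.sorted (xs ++ [x]) key true
        = PySem.List.insertBy (fun a b => decide (key b < key a)) x
            (PySem.List.sorted xs key true) := by
      rw [PySem.List.sorted_rev_eq_foldl_insertBy, List.foldl_append,
        ← PySem.List.sorted_rev_eq_foldl_insertBy]
      rfl
    have hmapapp : (xs ++ [x]).map key = xs.map key ++ [key x] := by simp
    have hfilter : (fun k => (xs ++ [x]).filter (fun t => key t == k))
        = (fun k => xs.filter (fun t => key t == k) ++ if key x == k then [x] else []) := by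
      funext k
      rw [List.filter_append]
      congr 1
      by_cases h : key x = k
      · simp [h]
      · simp [beq_eq_false_iff_ne.mpr h]
    have hnd : (PySem.Set.ofList (xs.map key)).Nodup := PySem.Set.nodup_ofList _
    have hg : ∀ k ∈ PySem.List.sorted (PySem.Set.ofList (xs.map key)) (fun x => x) true,
        ∀ t ∈ xs.filter (fun t => key t == k), key t = k := by
      intro k _ t ht
      exact beq_iff_eq.mp ((List.mem_filter.mp ht).2)
    have hdesc := sorted_rev_pairwise_gt_of_nodup _ hnd
    rw [hL, ih, hmapapp, hfilter]
    by_cases hmem : key x ∈ PySem.Set.ofList (xs.map key)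
    · have hadd : PySem.Set.ofList (xs.map key ++ [key x]) = PySem.Set.ofList (xs.map key) := by
        rw [PySem.Set.ofList_append_singleton]
        simp [PySem.Set.add, PySem.Set.contains, hmem]
      rw [hadd]
      exact insert_grouped_mem key x _ _ hdesc hg
        ((PySem.List.mem_sorted _ _ _ _).mpr hmem)
    · have hadd : PySem.Set.ofList (xs.map key ++ [key x])
          = PySem.Set.ofList (xs.map key) ++ [key x] := by
        rw [PySem.Set.ofList_append_singleton]
        simp [PySem.Set.add, PySem.Set.contains, hmem]
      have hDK : PySem.List.sorted (PySem.Set.ofList (xs.map key) ++ [key x]) (fun x => x) true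
          = PySem.List.insertBy (fun a b => decide (b < a)) (key x)
              (PySem.List.sorted (PySem.Set.ofList (xs.map key)) (fun x => x) true) := by
        rw [PySem.List.sorted_rev_eq_foldl_insertBy, List.foldl_append,
          ← PySem.List.sorted_rev_eq_foldl_insertBy]
        rfl
      have hgc : xs.filter (fun t => key t == key x) = [] := by
        rw [List.filter_eq_nil_iff]
        intro t ht hbe
        exact hmem ((PySem.Set.mem_ofList _ _).mpr
          (List.mem_map.mpr ⟨t, ht, beq_iff_eq.mp hbe⟩))
      rw [hadd, hDK]
      exact insert_grouped_new key x _ _ hdesc hg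
        (fun h => hmem ((PySem.List.mem_sorted _ _ _ _).mp h)) hgc

theorem foldl_prepend_eq_reverse_flatMap {α : Type} (g : α → List String)
    (l : List α) (init : List String) :
    l.foldl (fun res k => g k ++ res) init = l.reverse.flatMap g ++ init := by
  induction l generalizing init with
  | nil => simp
  | cons k t ih => simp [List.foldl_cons, ih]

-- ===== VERDICT (by name: the statement is the Claim_ definition above) =====
theorem sort_by_level_spec : Claim_equal_sort_by_level := by
  intro tags r _
  simp only [Spec_sort_by_level, sort_by_level, sort_by_level_alt]
  set key := levelKey r with hkeydef
  set od := tags.foldl (fun od tag =>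
      let level := key tag
      if od.contains level then od.insert level (od.getD level [] ++ [tag])
      else od.insert level [tag]) PySem.Dict.empty with hoddef
  set K := PySem.Set.ofList (tags.map key) with hKdef
  set G := fun k => tags.filter (fun t => key t == k) with hGdef
  have hstep : od = tags.foldl (fun d t => d.modify (key t) [] (· ++ [t])) PySem.Dict.empty := by
    rw [hoddef]
    apply PySem.List.foldl_congr_mem
    intro d t _
    by_cases h : d.contains (key t)
    · simp [h, PySem.Dict.modify]
    · simp [h, PySem.Dict.modify,
        PySem.Dict.getD_of_not_contains d ([] : List String) (by simpa using h)]
  have hmodmap : od = (tags.map (fun t => ((key t, t) : String × String))).foldl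
      (fun d p => d.modify p.1 [] (· ++ [p.2])) PySem.Dict.empty := by
    rw [hstep, List.foldl_map]
  have hgetD : ∀ k, od.getD k [] = G k := by
    intro k
    rw [hmodmap, PySem.Dict.getD_foldl_modify_append]
    simp [List.filter_map, Function.comp_def, hGdef, List.map_map]
  have hkeys : od.keys = K := by
    rw [hstep, PySem.Dict.keys_foldl_modify_key tags key [] (fun _ t => (· ++ [t]))]
    simp [PySem.Set.update, PySem.Set.ofList, PySem.Dict.keys_empty, hKdef]
  have hndK : K.Nodup := PySem.Set.nodup_ofList _
  have hitems : od.items = K.map (fun k => (k, G k)) := by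
    rw [PySem.Dict.items_eq_map_keys od (by rw [hkeys]; exact hndK) [], hkeys]
    exact List.map_congr_left (fun k _ => by rw [hgetD])
  set SK := PySem.List.sorted K (fun x => x) false with hSKdef
  have hndSK : SK.Nodup := ((PySem.List.sorted_perm K (fun x => x) false).nodup_iff).mpr hndK
  have hSKlt : SK.Pairwise (fun a b => a < b) := sorted_pairwise_lt_of_nodup K hndK
  have hsorted : PySem.List.sorted od.items (fun t => t.1) false
      = SK.map (fun k => (k, G k)) := by
    apply PySem.List.sorted_eq_of_perm_of_pairwise_lt
    · rw [hitems]
      exact (PySem.List.sorted_perm K (fun x => x) false).map _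
    · rw [List.pairwise_map]
      exact hSKlt
  set od2 := PySem.Dict.ofList (PySem.List.sorted od.items (fun t => t.1) false) with hod2def
  have hitems2 : od2.items = SK.map (fun k => (k, G k)) := by
    rw [hod2def, hsorted]
    show ((SK.map fun k => (k, G k)).foldl (fun d p => d.insert p.1 p.2) PySem.Dict.empty).items = _
    rw [PySem.Dict.items_foldl_insert_fresh (SK.map fun k => (k, G k)) Prod.fst Prod.snd
      PySem.Dict.empty (fun a _ => PySem.Dict.contains_empty _)
      (by simpa [List.map_map, Function.comp_def] using hndSK)]
    simp [PySem.Dict.empty, Function.comp_def]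
  have hkeys2 : od2.keys = SK := by
    show od2.items.map (fun p => p.1) = SK
    rw [hitems2]
    simp [List.map_map, Function.comp_def]
  have hgetD2 : ∀ k ∈ SK, od2.getD k [] = G k := by
    intro k hkm
    exact PySem.Dict.getD_of_mem_items od2
      (hitems2 ▸ List.mem_map_of_mem hkm)
      (by rw [show od2.keys = SK from hkeys2]; exact hndSK) []
  rw [hkeys2, PySem.List.foldl_congr_mem _ _ (fun res k => G k ++ res) _
    (fun acc k hkm => by rw [hgetD2 k hkm]),
    foldl_prepend_eq_reverse_flatMap, List.append_nil]
  have hrev : SK.reverse = PySem.List.sorted K (fun x => x) true := by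
    symm
    apply PySem.List.sorted_rev_eq_of_perm_of_pairwise_gt
    · exact SK.reverse_perm.trans (PySem.List.sorted_perm K (fun x => x) false)
    · exact List.pairwise_reverse.mpr hSKlt
  rw [hrev, sorted_rev_grouped key tags]
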